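-- pv_equiv track=rewrite | github.com/karma9874/Seq2Seq-Chatbot | graph_Utils.py | print_data
-- ===== SOURCE A (Python) =====
-- def print_data(i,batch_x,index_to_vocabs):
--     data = []
--     for n in batch_x:
--         if n == 3373:
--             break
--         else:
--             if n not in [3772,3373,3774,3775]:
--                 data.append(index_to_vocabs[n])
--     return data
-- ===== SOURCE B (Python) =====
-- def print_data(i, batch_x, index_to_vocabs):
--     try:
--         stop = batch_x.index(3373)
--     except ValueError:
--         stop = len(batch_x)
--     return [index_to_vocabs[n] for n in batch_x[:stop] if n not in (3772, 3774, 3775)]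
-- ===== Notes on version B (the rewrite author's own statement) =====
-- stated objective: idiomatic
-- what changed: B replaces the single break-loop with a two-phase pipeline: it first truncates batch_x at the first sentinel 3373 via list.index and a slice, then builds the result with one filter/map comprehension over that prefix.
import Mathlib
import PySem

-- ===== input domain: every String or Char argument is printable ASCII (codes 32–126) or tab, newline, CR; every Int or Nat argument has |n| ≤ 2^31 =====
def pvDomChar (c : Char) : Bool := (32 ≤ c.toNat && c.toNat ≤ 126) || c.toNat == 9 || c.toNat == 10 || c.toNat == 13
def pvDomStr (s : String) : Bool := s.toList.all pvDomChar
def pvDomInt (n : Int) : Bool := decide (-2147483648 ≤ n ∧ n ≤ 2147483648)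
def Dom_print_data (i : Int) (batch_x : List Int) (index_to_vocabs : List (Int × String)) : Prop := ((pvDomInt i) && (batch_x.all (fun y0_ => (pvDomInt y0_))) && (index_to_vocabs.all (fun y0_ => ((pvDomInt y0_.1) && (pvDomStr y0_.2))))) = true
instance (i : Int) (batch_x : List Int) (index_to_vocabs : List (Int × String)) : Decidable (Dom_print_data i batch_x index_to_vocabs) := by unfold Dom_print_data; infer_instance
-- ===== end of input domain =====

-- Re-implementation B: truncate at the first sentinel 3373 (list.index + slice), then one
-- filter/map pass — equivalent to A's break-loop; objective: idiomatic.
-- ===== PORT A =====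
-- dict lookup index_to_vocabs[n]; total via getD "" — Pre_ excludes the KeyError inputs
def pvLookup (index_to_vocabs : List (Int × String)) (n : Int) : String :=
  ((PySem.Dict.mk index_to_vocabs).get? n).getD ""

def printDataLoopA (index_to_vocabs : List (Int × String)) : List Int → List String
  | [] => []
  | n :: rest =>
    if n = 3373 then []
    else if n ∈ ([3772, 3373, 3774, 3775] : List Int) then printDataLoopA index_to_vocabs rest
    else pvLookup index_to_vocabs n :: printDataLoopA index_to_vocabs rest

def print_data (i : Int) (batch_x : List Int) (index_to_vocabs : List (Int × String)) : List String :=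
  printDataLoopA index_to_vocabs batch_x

-- ===== PORT B =====
def print_data_alt (i : Int) (batch_x : List Int) (index_to_vocabs : List (Int × String)) : List String :=
  let stop : Int :=
    match PySem.List.index? batch_x (3373 : Int) with
    | some k => (k : Int)           -- batch_x.index(3373)
    | none => (batch_x.length : Int) -- except ValueError: len(batch_x)
  ((PySem.List.slice batch_x none (some stop)).filter
      (fun n => !(decide (n ∈ ([3772, 3774, 3775] : List Int))))).map (pvLookup index_to_vocabs)

-- ===== PRECONDITION & SPEC =====
-- Pre_ excludes exactly the KeyError inputs: some token before the first sentinel, outside the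
-- skip set, is missing from index_to_vocabs (Python A raises KeyError there).
def Pre_print_data (i : Int) (batch_x : List Int) (index_to_vocabs : List (Int × String)) : Prop :=
  ∀ n ∈ batch_x.takeWhile (fun m => m ≠ 3373),
    n ∉ ([3772, 3774, 3775] : List Int) → ((PySem.Dict.mk index_to_vocabs).get? n).isSome

instance (i : Int) (batch_x : List Int) (index_to_vocabs : List (Int × String)) : Decidable (Pre_print_data i batch_x index_to_vocabs) := by unfold Pre_print_data; infer_instance

def pvWitness_print_data : Int × List Int × (List (Int × String)) :=
  (0, [1, 3772, 2, 3373, 9], [(1, "hello"), (2, "world")])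

def Spec_print_data (i : Int) (batch_x : List Int) (index_to_vocabs : List (Int × String)) (out : List String) : Prop := out = print_data_alt i batch_x index_to_vocabs
instance (i : Int) (batch_x : List Int) (index_to_vocabs : List (Int × String)) (out : List String) : Decidable (Spec_print_data i batch_x index_to_vocabs out) := by unfold Spec_print_data; infer_instance

-- ===== CLAIM (what is proved, stated in full; the proofs are below) =====
def Claim_equal_print_data : Prop := ∀ (i : Int) (batch_x : List Int) (index_to_vocabs : List (Int × String)), Dom_print_data i batch_x index_to_vocabs → Pre_print_data i batch_x index_to_vocabs → Spec_print_data i batch_x index_to_vocabs (print_data i batch_x index_to_vocabs)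

-- ===== LEMMAS AND PROOFS =====
-- A's loop produces the map/filter of the prefix before the first sentinel.
theorem printDataLoopA_eq (ivs : List (Int × String)) (xs : List Int) :
    printDataLoopA ivs xs =
      ((xs.takeWhile (fun m => decide (m ≠ 3373))).filter
          (fun n => !(decide (n ∈ ([3772, 3774, 3775] : List Int))))).map (pvLookup ivs) := by
  induction xs with
  | nil => rfl
  | cons n rest ih =>
    by_cases h : n = 3373
    · subst h; simp [printDataLoopA, List.takeWhile]
    · by_cases hm : n ∈ ([3772, 3774, 3775] : List Int)
      · have hm4 : n ∈ ([3772, 3373, 3774, 3775] : List Int) := by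
          simp only [List.mem_cons] at hm ⊢; tauto
        simp only [List.mem_cons, List.not_mem_nil, or_false] at hm
        rcases hm with rfl | rfl | rfl <;>
          simp [printDataLoopA, hm4, List.takeWhile, ih]
      · have hm4 : n ∉ ([3772, 3373, 3774, 3775] : List Int) := by
          simp only [List.mem_cons] at hm ⊢; tauto
        simp only [List.mem_cons, List.not_mem_nil, or_false, not_or] at hm
        obtain ⟨h1, h2, h3⟩ := hm
        simp [printDataLoopA, h, hm4, List.takeWhile, h1, h2, h3, ih]

-- the python-level truncation index reproduces takeWhile (· ≠ 3373)
theorem take_stop_eq_takeWhile (xs : List Int) :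
    xs.take ((PySem.List.index? xs (3373 : Int)).getD xs.length) =
      xs.takeWhile (fun m => decide (m ≠ 3373)) := by
  induction xs with
  | nil => rfl
  | cons n rest ih =>
    by_cases h : n = 3373
    · subst h
      rw [PySem.List.index?_cons_self]
      simp [List.takeWhile]
    · rw [PySem.List.index?_cons_of_ne rest (show n ≠ 3373 from h)]
      cases hk : PySem.List.index? rest (3373 : Int) with
      | none =>
        simp only [Option.map_none, Option.getD_none, List.length_cons, List.take_succ_cons,
          List.takeWhile]
        rw [hk] at ih
        simp only [Option.getD_none] at ih
        simp [h, ih]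
      | some k =>
        simp only [Option.map_some, Option.getD_some, List.take_succ_cons, List.takeWhile]
        rw [hk] at ih
        simp only [Option.getD_some] at ih
        simp [h, ih]

-- ===== VERDICT (by name: the statement is the Claim_ definition above) =====
theorem print_data_spec : Claim_equal_print_data := by
  intro i batch_x ivs _ _
  unfold Spec_print_data print_data print_data_alt
  rw [printDataLoopA_eq]
  cases hk : PySem.List.index? batch_x (3373 : Int) with
  | none =>
    have := take_stop_eq_takeWhile batch_x
    rw [hk] at this
    simp only [Option.getD_none] at this
    simp only [PySem.List.slice_to_natCast, this]
  | some k =>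
    have := take_stop_eq_takeWhile batch_x
    rw [hk] at this
    simp only [Option.getD_some] at this
    simp only [PySem.List.slice_to_natCast, this]
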